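-- pv_equiv track=rewrite | github.com/Redeemedduck/GolfDataApp | scripts/practice_planner.py | allocate_reps
-- ===== SOURCE A (Python) =====
-- from typing import Any, Dict, List, Optional
--
-- def allocate_reps(num_blocks: int, total_budget: int) -> List[int]:
--     """Distribute reps across drill blocks."""
--     if num_blocks == 0:
--         return []
--     base = total_budget // num_blocks
--     remainder = total_budget % num_blocks
--     reps = [base] * num_blocks
--     for i in range(remainder):
--         reps[i] += 1
--     # Clamp each block to 15-20
--     return [max(15, min(20, r)) for r in reps]
-- ===== SOURCE B (Python) =====
-- def allocate_reps(num_blocks: int, total_budget: int) -> list: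
--     """Greedy allocation: each block gets the ceiling of the remaining budget
--     over the remaining blocks, clamped to 15-20."""
--     reps = []
--     remaining = total_budget
--     for blocks_left in range(num_blocks, 0, -1):
--         give = -((-remaining) // blocks_left)  # ceil division
--         reps.append(max(15, min(20, give)))
--         remaining -= give
--     return reps
-- ===== Notes on version B (the rewrite author's own statement) =====
-- stated objective: alternative
-- what changed: B drops A's divmod-then-increment-loop allocation entirely and instead recurses greedily, giving each block the ceiling of the remaining budget over the remaining blocks (clamped to 15-20).
import Mathlib
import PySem

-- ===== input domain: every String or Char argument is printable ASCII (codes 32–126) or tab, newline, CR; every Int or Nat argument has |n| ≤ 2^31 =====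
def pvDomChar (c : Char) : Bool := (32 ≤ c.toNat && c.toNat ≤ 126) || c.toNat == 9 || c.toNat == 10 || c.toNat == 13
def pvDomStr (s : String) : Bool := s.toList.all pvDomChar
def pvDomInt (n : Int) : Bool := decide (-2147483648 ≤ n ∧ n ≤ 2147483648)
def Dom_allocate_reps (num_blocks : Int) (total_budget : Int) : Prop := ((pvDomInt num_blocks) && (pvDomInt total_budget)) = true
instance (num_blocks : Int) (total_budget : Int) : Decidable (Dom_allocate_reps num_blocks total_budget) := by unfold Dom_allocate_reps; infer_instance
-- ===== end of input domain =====

-- B replaces A's divmod-plus-increment-loop allocation by a greedy recursion that hands each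
-- block the ceiling of the remaining budget over the remaining blocks; objective: alternative.

-- ===== PORT A =====
def allocate_reps (num_blocks : Int) (total_budget : Int) : List Int :=
  if num_blocks = 0 then []
  else
    let base := PySem.Int.floordiv total_budget num_blocks
    let remainder := PySem.Int.mod total_budget num_blocks
    let reps := List.replicate num_blocks.toNat base
    -- 'for i in range(remainder): reps[i] += 1'; indices are always in range here
    let reps := (PySem.List.pyRange 0 remainder 1).foldl
      (fun acc i => acc.set i.toNat (acc.getD i.toNat 0 + 1)) reps
    reps.map (fun r => max 15 (min 20 r))

-- ===== PORT B =====
def allocate_reps_alt (num_blocks : Int) (total_budget : Int) : List Int :=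
  if num_blocks ≤ 0 then []
  else
    let give := -(PySem.Int.floordiv (-total_budget) num_blocks)  -- ceil division
    max 15 (min 20 give) :: allocate_reps_alt (num_blocks - 1) (total_budget - give)
termination_by num_blocks.toNat
decreasing_by
  rename_i h
  omega

-- ===== PRECONDITION & SPEC =====
def Spec_allocate_reps (num_blocks : Int) (total_budget : Int) (out : List Int) : Prop := out = allocate_reps_alt num_blocks total_budget
instance (num_blocks : Int) (total_budget : Int) (out : List Int) : Decidable (Spec_allocate_reps num_blocks total_budget out) := by unfold Spec_allocate_reps; infer_instance

-- ===== CLAIM (what is proved, stated in full; the proofs are below) =====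
def Claim_equal_allocate_reps : Prop := ∀ (num_blocks : Int) (total_budget : Int), Dom_allocate_reps num_blocks total_budget → Spec_allocate_reps num_blocks total_budget (allocate_reps num_blocks total_budget)

-- ===== LEMMAS AND PROOFS =====

-- The increment loop on a constant list produces two constant runs.
theorem pv_incr_loop (r n : Nat) (h : r ≤ n) (b : Int) :
    (List.range r).foldl (fun acc i => acc.set i (acc.getD i 0 + 1)) (List.replicate n b)
      = List.replicate r (b + 1) ++ List.replicate (n - r) b := by
  induction r with
  | zero => simp
  | succ k ih =>
    rw [List.range_succ, List.foldl_append, ih (Nat.le_of_succ_le h)]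
    have hk : k < n := h
    have hrep : List.replicate (n - k) b = b :: List.replicate (n - (k + 1)) b := by
      rw [← List.replicate_succ]
      congr 1
      omega
    simp only [List.foldl_cons, List.foldl_nil, hrep]
    rw [List.getD_append_right, List.set_append_right] <;> simp [List.replicate_succ']

-- B's greedy recursion, in closed form: with budget b*k + r (0 ≤ r < k), the first r blocks
-- receive the clamped b+1 and the remaining k - r blocks the clamped b.
theorem pv_alt_closed (k : Nat) : ∀ b r : Int, 0 ≤ r → r < (k : Int) →
    allocate_reps_alt (k : Int) (b * k + r)
      = List.replicate r.toNat (max 15 (min 20 (b + 1)))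
        ++ List.replicate ((k : Int) - r).toNat (max 15 (min 20 b)) := by
  induction k with
  | zero => intro b r h0 h1; omega
  | succ m ih =>
    intro b r h0 h1
    rw [allocate_reps_alt]
    have hk : ¬ ((m + 1 : Nat) : Int) ≤ 0 := by push_cast; omega
    simp only [hk, if_false]
    rcases eq_or_lt_of_le h0 with hr0 | hrpos
    · -- r = 0: this block gets b, recursion continues with budget b*m
      have hgive : -(PySem.Int.floordiv (-(b * ((m + 1 : Nat) : Int) + r)) ((m + 1 : Nat) : Int)) = b := by
        rw [PySem.Int.neg_floordiv_neg_eq_iff_of_pos (by push_cast; omega)]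
        push_cast; constructor <;> nlinarith
      rw [hgive]
      have hbud : b * ((m + 1 : Nat) : Int) + r - b = b * (m : Int) + 0 := by push_cast; ring_nf; omega
      have hblk : ((m + 1 : Nat) : Int) - 1 = (m : Int) := by push_cast; ring
      rw [hbud, hblk]
      have hrec : allocate_reps_alt (m : Int) (b * (m : Int) + 0)
          = List.replicate (0 : Int).toNat (max 15 (min 20 (b + 1)))
            ++ List.replicate ((m : Int) - 0).toNat (max 15 (min 20 b)) := by
        rcases Nat.eq_zero_or_pos m with hm | hm
        · subst hm
          rw [allocate_reps_alt]
          simp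
        · exact ih b 0 le_rfl (by exact_mod_cast hm)
      rw [hrec]
      have h1 : r.toNat = 0 := by omega
      have h2 : (((m + 1 : Nat) : Int) - r).toNat = ((m : Int) - 0).toNat + 1 := by push_cast; omega
      rw [h1, h2]
      simp [List.replicate_succ]
    · -- r > 0: this block gets b+1, recursion continues with budget b*m + (r-1)
      have h1' : r < (m : Int) + 1 := by push_cast at h1; omega
      have hgive : -(PySem.Int.floordiv (-(b * ((m + 1 : Nat) : Int) + r)) ((m + 1 : Nat) : Int)) = b + 1 := by
        rw [PySem.Int.neg_floordiv_neg_eq_iff_of_pos (by push_cast; omega)]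
        push_cast; constructor <;> nlinarith [h1']
      rw [hgive]
      have hm : 0 < m := by omega
      have hbud : b * ((m + 1 : Nat) : Int) + r - (b + 1) = b * (m : Int) + (r - 1) := by push_cast; ring
      have hblk : ((m + 1 : Nat) : Int) - 1 = (m : Int) := by push_cast; ring
      rw [hbud, hblk, ih b (r - 1) (by omega) (by push_cast at h1 ⊢; omega)]
      have h2 : r.toNat = (r - 1).toNat + 1 := by omega
      have h3 : (((m + 1 : Nat) : Int) - r).toNat = ((m : Int) - (r - 1)).toNat := by push_cast; omega
      rw [h2, h3, List.replicate_succ]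
      simp

-- ===== VERDICT (by name: the statement is the Claim_ definition above) =====
theorem allocate_reps_spec : Claim_equal_allocate_reps := by
  intro n t _
  unfold Spec_allocate_reps
  rcases lt_trichotomy n 0 with hn | hn | hn
  · -- n < 0 : both return [] (A through an empty replicate and an empty range)
    have hne : ¬ n = 0 := by omega
    have hpos : (0:Int) < -n := by omega
    have h1 : PySem.Int.mod t n = -(PySem.Int.mod (-t) (-n)) := by
      have h := PySem.Int.mod_neg_neg (-t) (-n)
      rw [neg_neg, neg_neg] at h
      omega
    have h2 : 0 ≤ PySem.Int.mod (-t) (-n) := by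
      rw [PySem.Int.mod_eq_emod_of_pos hpos]
      exact Int.emod_nonneg _ (by omega)
    have hmod : PySem.Int.mod t n ≤ 0 := by omega
    rw [allocate_reps_alt]
    simp [allocate_reps, hne, hn.le, PySem.List.pyRange_one_eq_nil hmod, Int.toNat_of_nonpos hn.le]
  · subst hn
    rw [allocate_reps_alt]
    simp [allocate_reps]
  · -- n > 0 : both equal the two-segment closed form
    have hne : ¬ n = 0 := by omega
    have hemod : PySem.Int.mod t n = t % n := PySem.Int.mod_eq_emod_of_pos hn
    have hediv : PySem.Int.floordiv t n = t / n := PySem.Int.floordiv_eq_ediv_of_pos hn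
    have h0 : 0 ≤ t % n := Int.emod_nonneg t (by omega)
    have hlt : t % n < n := Int.emod_lt_of_pos t hn
    -- A side
    unfold allocate_reps
    simp only [hne, if_false, hemod, hediv]
    rw [PySem.List.pyRange_one, List.foldl_map]
    have hfun : (fun (acc : List Int) (k : Nat) =>
        (fun acc (i : Int) => acc.set i.toNat (acc.getD i.toNat 0 + 1)) acc ((0:Int) + k))
        = fun acc k => acc.set k (acc.getD k 0 + 1) := by
      funext acc k; simp
    rw [show ((t % n - 0).toNat) = (t % n).toNat by omega]
    rw [hfun, pv_incr_loop (t % n).toNat n.toNat (by omega) _]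
    rw [List.map_append, List.map_replicate, List.map_replicate]
    -- B side via the closed form, with t = (t/n)*n + t%n
    have hcast : ((n.toNat : Nat) : Int) = n := by omega
    rw [show allocate_reps_alt n t = allocate_reps_alt n (t / n * n + t % n) by have h := Int.ediv_add_emod t n; congr 1; linear_combination -h]
    rw [show allocate_reps_alt n (t / n * n + t % n)
        = allocate_reps_alt ((n.toNat : Nat) : Int) (t / n * ((n.toNat : Nat) : Int) + t % n) by rw [hcast]]
    rw [pv_alt_closed n.toNat (t / n) (t % n) h0 (by rw [hcast]; exact hlt)]
    rw [hcast]
    congr 2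
    omega
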